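-- pv_equiv track=rewrite | github.com/Kawser-nerd/CLCDSA | Source Codes/AtCoder/arc014/B/3305531.py | end_at_one_based
-- ===== SOURCE A (Python) =====
-- def end_at_one_based(words):
--     se = set()
--     for i, w in enumerate(words):
--         if w in se:
--             return i + 1
--         if i > 0 and w[0] != words[i - 1][-1]:
--             return i + 1
--         se.add(w)
--     return 0
-- ===== SOURCE B (Python) =====
-- def end_at_one_based(words):
--     n = len(words)
--     # pass 1: first index whose word was already seen (else n)
--     dup = n
--     seen = set()
--     for i, w in enumerate(words):
--         if w in seen:
--             dup = i
--             break
--         seen.add(w)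
--     # pass 2: first index breaking the chain rule (else n); slice compare is total
--     brk = n
--     for i, (prev, cur) in enumerate(zip(words, words[1:]), start=1):
--         if cur[:1] != prev[-1:]:
--             brk = i
--             break
--     m = min(dup, brk)
--     return m + 1 if m < n else 0
-- ===== Notes on version B (the rewrite author's own statement) =====
-- stated objective: alternative
-- what changed: Replaces A's single fused loop (early return on first violation) with two independent passes - a seen-set pass finding the first duplicate index and a zip-of-adjacent-pairs pass finding the first chain break via total slice comparison cur[:1] != prev[-1:] - combined by min and converted to 1-based (or 0).
import Mathlib
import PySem

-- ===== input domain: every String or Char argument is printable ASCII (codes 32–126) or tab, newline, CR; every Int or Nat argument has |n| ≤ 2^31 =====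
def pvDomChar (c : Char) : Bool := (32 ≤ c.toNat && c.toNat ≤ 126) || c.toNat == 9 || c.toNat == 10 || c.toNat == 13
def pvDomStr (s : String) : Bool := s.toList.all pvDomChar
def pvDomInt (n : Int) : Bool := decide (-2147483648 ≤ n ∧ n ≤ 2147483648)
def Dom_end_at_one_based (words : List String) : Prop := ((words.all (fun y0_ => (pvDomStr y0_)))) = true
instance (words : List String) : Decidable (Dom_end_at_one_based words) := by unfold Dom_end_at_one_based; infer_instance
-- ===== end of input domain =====

-- B replaces A's single fused early-return loop by two independent passes (first duplicate,
-- first adjacent-pair chain break over zip, compared via total slices) combined with min;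
-- objective: alternative decomposition.

-- ===== PORT A =====
-- the for-loop over enumerate(words): counter i, structural walk over the remaining words, set se
def endAtGo (words : List String) : Nat → List String → PySem.Set String → Int
  | _, [], _ => 0
  | i, w :: rest, se =>
    if PySem.Set.contains se w then (i : Int) + 1
    else if 0 < i ∧ PySem.Str.pyGet? w 0 ≠ PySem.Str.pyGet? ((PySem.List.pyGet? words ((i : Int) - 1)).getD "") (-1) then (i : Int) + 1
    else endAtGo words (i + 1) rest (PySem.Set.add se w)

def end_at_one_based (words : List String) : Int :=
  endAtGo words 0 words PySem.Set.empty

-- ===== PORT B =====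
-- pass 1 of Source B: first index whose word was already seen (else n)
def altDup : Nat → List String → PySem.Set String → Nat → Nat
  | _, [], _, n => n
  | i, w :: rest, seen, n =>
    if PySem.Set.contains seen w then i else altDup (i + 1) rest (PySem.Set.add seen w) n

-- pass 2 of Source B: enumerate(zip(words, words[1:]), start=1); first chain break (else n);
-- the test is Source B's total slice comparison cur[:1] != prev[-1:]
def altBrk : Nat → List (String × String) → Nat → Nat
  | _, [], n => n
  | i, (prev, cur) :: rest, n =>
    if PySem.Str.slice cur none (some 1) ≠ PySem.Str.slice prev (some (-1)) none then i
    else altBrk (i + 1) rest n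

def end_at_one_based_alt (words : List String) : Int :=
  let n := words.length
  let dup := altDup 0 words PySem.Set.empty n
  let brk := altBrk 1 (words.zip (PySem.List.slice words (some 1) none)) n
  let m := min dup brk
  if m < n then (m : Int) + 1 else 0

-- ===== PRECONDITION & SPEC =====
-- Pre_ excludes exactly the inputs on which A raises IndexError: those where A reaches an
-- adjacent pair involving an empty word (no earlier duplicate or chain break stops it first)
-- and so evaluates w[0] or words[i-1][-1] on an empty string.
def Pre_end_at_one_based (words : List String) : Prop :=
  ¬ ∃ i ∈ List.range words.length, 1 ≤ i ∧
      (words.getD i "" = "" ∨ words.getD (i-1) "" = "") ∧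
      words.getD i "" ∉ words.take i ∧
      ∀ j ∈ List.range i, 1 ≤ j →
        (words.getD j "" ∉ words.take j ∧ words.getD j "" ≠ "" ∧ words.getD (j-1) "" ≠ "" ∧
         PySem.Str.pyGet? (words.getD j "") 0 = PySem.Str.pyGet? (words.getD (j-1) "") (-1))
instance (words : List String) : Decidable (Pre_end_at_one_based words) := by
  unfold Pre_end_at_one_based; infer_instance

def pvWitness_end_at_one_based : List String := ["ab", "ba", "ab"]

def Spec_end_at_one_based (words : List String) (out : Int) : Prop := out = end_at_one_based_alt words
instance (words : List String) (out : Int) : Decidable (Spec_end_at_one_based words out) := by unfold Spec_end_at_one_based; infer_instance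

-- ===== CLAIM (what is proved, stated in full; the proofs are below) =====
def Claim_equal_end_at_one_based : Prop := ∀ (words : List String), Dom_end_at_one_based words → Pre_end_at_one_based words → Spec_end_at_one_based words (end_at_one_based words)

-- ===== LEMMAS AND PROOFS =====

-- Source B's total break test cur[:1] = prev[-1:] agrees with the option-valued character test
theorem sliceTest_iff (cur prev : String) :
    PySem.Str.slice cur none (some 1) = PySem.Str.slice prev (some (-1)) none ↔
      PySem.Str.pyGet? cur 0 = PySem.Str.pyGet? prev (-1) := by
  have h1 : (PySem.Str.slice cur none (some 1)).toList = cur.toList.take 1 := by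
    simp [PySem.Str.slice]
    rw [show (1:Int) = ((1:Nat):Int) from rfl, PySem.List.slice_to_natCast]
  have h2 : (PySem.Str.slice prev (some (-1)) none).toList = prev.toList.drop (prev.toList.length - 1) := by
    simp [PySem.Str.slice, PySem.List.slice_from_neg_one]
  have h3 : PySem.Str.pyGet? cur 0 = cur.toList[0]? := by
    simp [PySem.Str.pyGet?, PySem.List.pyGet?_zero]
  have h4 : PySem.Str.pyGet? prev (-1) = prev.toList.getLast? := by
    simp [PySem.Str.pyGet?, PySem.List.pyGet?_neg_one]
  rw [h3, h4, ← String.toList_inj, h1, h2]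
  rcases List.eq_nil_or_concat prev.toList with hm | ⟨ms, a, hm⟩ <;> rw [hm] <;>
    cases hl : cur.toList with
    | nil => simp
    | cons c cs => simp

-- altDup's result is n or one of the counter values, hence ≥ the starting counter
theorem altDup_ge (l : List String) (i : Nat) (se : PySem.Set String) (n : Nat) :
    altDup i l se n = n ∨ i ≤ altDup i l se n := by
  induction l generalizing i se with
  | nil => exact Or.inl rfl
  | cons w rest ih =>
    simp only [altDup]
    split
    · exact Or.inr le_rfl
    · rcases ih (i + 1) (PySem.Set.add se w) with h | h
      · exact Or.inl h
      · exact Or.inr (le_trans (by omega) h)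

theorem altBrk_ge (l : List (String × String)) (i : Nat) (n : Nat) :
    altBrk i l n = n ∨ i ≤ altBrk i l n := by
  induction l generalizing i with
  | nil => exact Or.inl rfl
  | cons p rest ih =>
    obtain ⟨prev, cur⟩ := p
    simp only [altBrk]
    split
    · exact Or.inr le_rfl
    · rcases ih (i + 1) with h | h
      · exact Or.inl h
      · exact Or.inr (le_trans (by omega) h)

theorem zip_drop {α β : Type} (l : List α) (m : List β) (k : Nat) :
    (l.zip m).drop k = (l.drop k).zip (m.drop k) := by
  induction l generalizing m k with
  | nil => simp
  | cons a l ih =>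
    cases m with
    | nil => simp
    | cons b m =>
      cases k with
      | zero => simp
      | succ k => simpa using ih m k

-- the main invariant: A's loop from position i equals B's two passes from position i, combined
theorem endAtGo_eq (words : List String) (suf : List String) (i : Nat)
    (se : PySem.Set String) (hdrop : words.drop i = suf) :
    endAtGo words i suf se =
      (if min (altDup i suf se words.length)
              (altBrk (max 1 i) ((words.zip words.tail).drop (max 1 i - 1)) words.length)
            < words.length
       then ((min (altDup i suf se words.length)
              (altBrk (max 1 i) ((words.zip words.tail).drop (max 1 i - 1)) words.length) : Nat) : Int) + 1
       else 0) := by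
  induction suf generalizing i se with
  | nil =>
    have hin : words.length <= i := by
      by_contra h
      have := List.drop_eq_nil_iff.mp hdrop
      omega
    have hz : ((words.zip words.tail).drop (max 1 i - 1)) = ([] : List (String × String)) := by
      apply List.drop_eq_nil_of_le
      simp only [List.length_zip, List.length_tail]
      omega
    rw [hz]
    simp [endAtGo, altDup, altBrk]
  | cons w rest ih =>
    have hi : i < words.length := by
      by_contra h
      have : words.drop i = [] := List.drop_eq_nil_of_le (by omega)
      rw [this] at hdrop; cases hdrop
    have hn1 : 1 <= words.length := by omega
    have hw : words[i]? = some w := by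
      have : (words.drop i)[0]? = words[i+0]? := List.getElem?_drop
      rw [hdrop] at this; simpa using this.symm
    have hrest : words.drop (i + 1) = rest := by
      have := congrArg List.tail hdrop
      simpa [List.tail_drop] using this
    -- the b-pass value is n or >= max 1 i
    have hb := altBrk_ge ((words.zip words.tail).drop (max 1 i - 1)) (max 1 i) words.length
    simp only [endAtGo, altDup]
    by_cases hc : PySem.Set.contains se w
    · -- duplicate found at i: both sides give i + 1
      rw [if_pos hc, if_pos hc]
      have hmin : min i (altBrk (max 1 i) ((words.zip words.tail).drop (max 1 i - 1)) words.length) = i := by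
        rcases hb with h | h
        · omega
        · omega
      rw [hmin, if_pos hi]
    · rw [if_neg hc, if_neg hc]
      -- the duplicate pass recurses on both sides
      have hd := altDup_ge rest (i + 1) (PySem.Set.add se w) words.length
      by_cases hp : 0 < i
      · -- i >= 1: the break list from position i starts with (words[i-1], w)
        have hmx : max 1 i = i := by omega
        have hi1 : i - 1 < words.length := by omega
        have hprev : words.drop (i - 1) = words[i - 1] :: w :: rest := by
          rw [List.drop_eq_getElem_cons hi1]
          congr 1
          have : i - 1 + 1 = i := by omega
          rw [this, hdrop]
        have hzdrop : (words.zip words.tail).drop (i - 1)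
            = (words[i - 1], w) :: (words.zip words.tail).drop i := by
          rw [zip_drop, zip_drop]
          have ht1 : words.tail.drop (i - 1) = words.drop i := by
            have : i - 1 + 1 = i := by omega
            simp [List.drop_tail, this]
          have ht2 : words.tail.drop i = words.drop (i + 1) := by
            simp [List.drop_tail]
          rw [ht1, ht2, hprev, hdrop, hrest]
          simp [List.zip]
        have hpg : PySem.List.pyGet? words ((i : Int) - 1) = some words[i - 1] := by
          have hcast : (i : Int) - 1 = ((i - 1 : Nat) : Int) := by omega
          rw [hcast, PySem.List.pyGet?_natCast, List.getElem?_eq_getElem hi1]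
        rw [hmx, hzdrop]
        simp only [altBrk, hpg, Option.getD_some, ne_eq, sliceTest_iff]
        by_cases hne : PySem.Str.pyGet? w 0 ≠ PySem.Str.pyGet? words[i - 1] (-1)
        · -- chain break at i: both sides give i + 1
          rw [if_pos ⟨hp, hne⟩, if_pos hne]
          have hmin : min (altDup (i+1) rest (PySem.Set.add se w) words.length) i = i := by
            rcases hd with h | h <;> omega
          rw [hmin, if_pos hi]
        · -- no violation at i: step both sides to i + 1
          rw [if_neg (by tauto), if_neg hne]
          have := ih (i + 1) (PySem.Set.add se w) hrest
          rw [this]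
          have hmx1 : max 1 (i + 1) = i + 1 := by omega
          rw [hmx1]
          have : i + 1 - 1 = i := by omega
          rw [this]
      · -- i = 0: A's break test is off; B's break list is the same for i = 0 and i = 1
        have hi0 : i = 0 := by omega
        subst hi0
        rw [if_neg (by simp)]
        have := ih 1 (PySem.Set.add se w) (by simpa using hrest)
        rw [this]
        norm_num

-- ===== VERDICT (by name: the statement is the Claim_ definition above) =====
theorem end_at_one_based_spec : Claim_equal_end_at_one_based := by
  intro words _ _
  show end_at_one_based words = end_at_one_based_alt words
  rw [end_at_one_based, endAtGo_eq words words 0 PySem.Set.empty rfl]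
  simp only [end_at_one_based_alt, PySem.List.slice_from_one]
  rfl
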